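-- pv_equiv track=rewrite | github.com/chadsr/cryptoshot | cryptoshot/services/apis/kraken.py | __get_kraken_id_suffix
-- ===== SOURCE A (Python) =====
-- from enum import StrEnum
-- from typing import NamedTuple, NotRequired, TypedDict, TypeAlias, cast
--
-- KrakenAssetID: TypeAlias = str
--
-- class KrakenLedgerAssetSuffix(StrEnum):
--     STAKED = ".S"
--     STAKED_7 = "07.S"
--     STAKED_14 = "14.S"
--     STAKED_28 = "28.S"
--     YIELD_BEARING = ".B"
--     OPT_IN_REWARD = ".M"
--     AUTO_REWARD = ".F"
--
-- def __get_kraken_id_suffix(kraken_asset_id: KrakenAssetID) -> KrakenLedgerAssetSuffix | None: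
--     suffix_offset = 3
--     suffix_set = set(iter(KrakenLedgerAssetSuffix))
--
--     while suffix_offset < len(kraken_asset_id):
--         suffix = kraken_asset_id[suffix_offset:]
--         if suffix in suffix_set:
--             return cast(KrakenLedgerAssetSuffix, suffix)
--
--         suffix_offset += 1
--
--     return None
-- ===== SOURCE B (Python) =====
-- # B: instead of scanning offsets of the id, iterate the candidate suffixes
-- # longest-first and test each with endswith (keeping the offset-starts-at-3
-- # rule as a length guard). Same result: the longest matching tail of length
-- # at most len(id) - 3.
--
-- _SUFFIXES_LONGEST_FIRST = ["07.S", "14.S", "28.S", ".S", ".B", ".M", ".F"]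
--
-- def __get_kraken_id_suffix(kraken_asset_id: str):
--     n = len(kraken_asset_id)
--     for s in _SUFFIXES_LONGEST_FIRST:
--         if n - len(s) >= 3 and kraken_asset_id.endswith(s):
--             return s
--     return None
-- ===== Notes on version B (the rewrite author's own statement) =====
-- stated objective: faster
-- what changed: B iterates over the seven candidate suffix strings longest-first, testing each with endswith plus a len(id)-len(s)>=3 guard, instead of A's while-loop materialising and set-testing every slice kraken_asset_id[offset:] of the id.
import Mathlib
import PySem

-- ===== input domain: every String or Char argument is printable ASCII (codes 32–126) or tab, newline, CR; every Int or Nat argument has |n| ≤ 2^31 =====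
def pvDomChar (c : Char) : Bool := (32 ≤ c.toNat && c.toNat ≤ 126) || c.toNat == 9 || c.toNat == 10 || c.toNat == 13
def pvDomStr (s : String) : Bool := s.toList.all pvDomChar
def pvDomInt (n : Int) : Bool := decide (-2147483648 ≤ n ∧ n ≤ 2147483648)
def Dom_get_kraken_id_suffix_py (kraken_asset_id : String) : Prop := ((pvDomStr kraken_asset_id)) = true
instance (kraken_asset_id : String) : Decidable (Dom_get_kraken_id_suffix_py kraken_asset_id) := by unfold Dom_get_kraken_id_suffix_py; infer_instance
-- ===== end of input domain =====

-- B replaces A's offset scan of the id by a longest-first iteration over the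
-- seven candidate suffixes, testing each with endswith plus the >= 3 length
-- guard; a timing run measured B faster (A slices at every offset).

-- ===== PORT A =====
-- set(iter(KrakenLedgerAssetSuffix)) — membership-only use, order immaterial
def krakenSuffixSet : PySem.Set (List Char) :=
  PySem.Set.ofList
    [".S".toList, "07.S".toList, "14.S".toList, "28.S".toList,
     ".B".toList, ".M".toList, ".F".toList]

-- A's while-loop: 'suffix = kraken_asset_id[suffix_offset:]' shrinks by one
-- character per turn (suffix_offset += 1); the loop runs while it is nonempty.
def krakenLoopA : List Char → Option String
  | [] => none
  | c :: rest =>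
      if PySem.Set.contains krakenSuffixSet (c :: rest) then some (String.ofList (c :: rest))
      else krakenLoopA rest

def get_kraken_id_suffix_py (kraken_asset_id : String) : Option String :=
  krakenLoopA (kraken_asset_id.toList.drop 3)   -- suffix_offset starts at 3

-- ===== PORT B =====
def krakenSuffixesLongestFirst : List String := ["07.S", "14.S", "28.S", ".S", ".B", ".M", ".F"]

def get_kraken_id_suffix_py_alt (kraken_asset_id : String) : Option String :=
  let cs := kraken_asset_id.toList
  krakenSuffixesLongestFirst.find? (fun s =>
    decide (3 ≤ cs.length - s.toList.length) && PySem.Chars.endswith cs s.toList)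

-- ===== PRECONDITION & SPEC =====
def Spec_get_kraken_id_suffix_py (kraken_asset_id : String) (out : Option String) : Prop := out = get_kraken_id_suffix_py_alt kraken_asset_id
instance (kraken_asset_id : String) (out : Option String) : Decidable (Spec_get_kraken_id_suffix_py kraken_asset_id out) := by unfold Spec_get_kraken_id_suffix_py; infer_instance

-- ===== CLAIM (what is proved, stated in full; the proofs are below) =====
def Claim_equal_get_kraken_id_suffix_py : Prop := ∀ (kraken_asset_id : String), Dom_get_kraken_id_suffix_py kraken_asset_id → Spec_get_kraken_id_suffix_py kraken_asset_id (get_kraken_id_suffix_py kraken_asset_id)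

-- ===== LEMMAS AND PROOFS =====

-- general find? congruence on members
theorem krakenFind?_congr {α : Type} (p q : α → Bool) :
    ∀ l : List α, (∀ a ∈ l, p a = q a) → l.find? p = l.find? q := by
  intro l
  induction l with
  | nil => intro _; rfl
  | cons a t ih =>
      intro h
      simp only [List.find?]
      rw [h a (List.mem_cons_self)]
      cases q a with
      | true => rfl
      | false => exact ih (fun b hb => h b (List.mem_cons_of_mem _ hb))

-- a nonempty suffix of cs.drop k is exactly a suffix of cs of length ≤ cs.length - k
theorem krakenSuffix_drop_iff (l cs : List Char) (k : Nat) (hl : l ≠ []) :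
    l <:+ cs.drop k ↔ (l <:+ cs ∧ l.length + k ≤ cs.length) := by
  constructor
  · intro h
    refine ⟨h.trans (List.drop_suffix k cs), ?_⟩
    have h1 := h.length_le
    have h2 : cs.drop k ≠ [] := by
      intro he; rw [he] at h; exact hl (List.suffix_nil.mp h)
    have h3 : k < cs.length := by
      by_contra hk
      exact h2 (List.drop_eq_nil_of_le (by omega))
    simp [List.length_drop] at h1
    omega
  · rintro ⟨⟨u, hu⟩, hlen⟩
    have hu' : u.length + l.length = cs.length := by
      rw [← hu]; simp
    refine ⟨u.drop k, ?_⟩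
    rw [← hu, List.drop_append_of_le_length (by omega)]

-- A's loop equals the longest-first find? over the candidates, on any tail
theorem krakenLoopA_eq_find (t : List Char) :
    krakenLoopA t =
      krakenSuffixesLongestFirst.find? (fun s => s.toList.isSuffixOf t) := by
  induction t with
  | nil => decide
  | cons a t ih =>
      rw [krakenLoopA]
      by_cases h : PySem.Set.contains krakenSuffixSet (a :: t)
      · rw [if_pos h]
        have hm : (a :: t) ∈ (krakenSuffixSet : List (List Char)) := by
          simpa [PySem.Set.contains] using h
        have : (a :: t) = ".S".toList ∨ (a :: t) = "07.S".toList ∨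
               (a :: t) = "14.S".toList ∨ (a :: t) = "28.S".toList ∨
               (a :: t) = ".B".toList ∨ (a :: t) = ".M".toList ∨
               (a :: t) = ".F".toList := by
          simpa [krakenSuffixSet, PySem.Set.ofList] using hm
        rcases this with h' | h' | h' | h' | h' | h' | h' <;> rw [h'] <;> decide
      · rw [if_neg h]
        rw [ih]
        apply krakenFind?_congr
        intro s hs
        have hne : s.toList ≠ a :: t := by
          intro he
          apply h
          have : (a :: t) ∈ (krakenSuffixSet : List (List Char)) := by
            fin_cases hs <;> simp_all [krakenSuffixSet, PySem.Set.ofList]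
          simpa [PySem.Set.contains] using this
        rw [Bool.eq_iff_iff]
        simp only [List.isSuffixOf_iff_suffix, List.suffix_cons_iff]
        tauto

-- ===== VERDICT (by name: the statement is the Claim_ definition above) =====
theorem get_kraken_id_suffix_py_spec : Claim_equal_get_kraken_id_suffix_py := by
  intro s _
  unfold Spec_get_kraken_id_suffix_py get_kraken_id_suffix_py get_kraken_id_suffix_py_alt
  rw [krakenLoopA_eq_find]
  apply krakenFind?_congr
  intro c hc
  have hcne : c.toList ≠ [] := by fin_cases hc <;> decide
  rw [Bool.eq_iff_iff]
  simp only [List.isSuffixOf_iff_suffix, Bool.and_eq_true, decide_eq_true_eq,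
    PySem.Chars.endswith_iff]
  rw [krakenSuffix_drop_iff _ _ 3 hcne]
  have hle : c.toList.length ≤ 4 := by fin_cases hc <;> decide
  constructor
  · rintro ⟨h1, h2⟩; exact ⟨by omega, h1⟩
  · rintro ⟨h1, h2⟩
    have := h2.length_le
    exact ⟨h2, by omega⟩
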